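-- pv_equiv track=rewrite | github.com/rogeroyer/dataCastle | JDD-2017/code_one.py | MostOccur
-- ===== SOURCE A (Python) =====
-- def MostOccur(group):
--     d = {}
--     s = set()
--     for x in group:
--         if x in s:
--             d[x] += 1;
--         else:
--             s.add(x)
--             d[x] = 1
--     for key in d:
--         if d[key] == max(d.values()):
--             return key
-- ===== SOURCE B (Python) =====
-- def MostOccur(group):
--     counts = {}
--     for x in group:
--         counts[x] = counts.get(x, 0) + 1
--     ranked = sorted(counts.items(), key=lambda kv: -kv[1])
--     return ranked[0][0] if ranked else None
-- ===== Notes on version B (the rewrite author's own statement) =====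
-- stated objective: faster
-- what changed: A rescans all counts to recompute max(d.values()) on every iteration of its selection loop; B builds the same count dict in one pass and then stably sorts the items by descending count once, taking the first key (stability preserves insertion-order tie-breaking), returning None on empty input like A.
import Mathlib
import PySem

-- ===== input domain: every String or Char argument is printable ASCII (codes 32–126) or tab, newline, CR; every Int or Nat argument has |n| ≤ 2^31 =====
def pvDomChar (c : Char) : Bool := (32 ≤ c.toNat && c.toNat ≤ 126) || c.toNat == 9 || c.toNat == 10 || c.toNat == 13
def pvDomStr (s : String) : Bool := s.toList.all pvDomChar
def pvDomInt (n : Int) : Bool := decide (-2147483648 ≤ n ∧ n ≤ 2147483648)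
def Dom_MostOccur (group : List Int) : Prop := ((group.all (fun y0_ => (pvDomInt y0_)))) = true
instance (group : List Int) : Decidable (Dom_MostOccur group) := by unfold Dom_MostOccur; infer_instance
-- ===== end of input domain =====

-- B replaces A's per-iteration rescan of max(d.values()) by one stable sort of the
-- count items by descending count (objective: faster).

-- ===== PORT A =====
-- first loop: builds dict d of counts and set s of seen values
-- second loop 'for key in d: if d[key] == max(d.values()): return key' is the
-- find? over d.keys; max(d.values()) is PySem.List.max? (never [] when the loop runs)
def MostOccur (group : List Int) : Option Int :=
  let st := group.foldl
    (fun (p : PySem.Dict Int Int × PySem.Set Int) x =>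
      if PySem.Set.contains p.2 x then (p.1.insert x (p.1.getD x 0 + 1), p.2)
      else (p.1.insert x 1, PySem.Set.add p.2 x))
    (PySem.Dict.empty, (PySem.Set.empty : PySem.Set Int))
  st.1.keys.find? (fun key =>
    decide (some (st.1.getD key 0) = PySem.List.max? st.1.values (fun v => v)))

-- ===== PORT B =====
def MostOccur_alt (group : List Int) : Option Int :=
  let counts := group.foldl
    (fun (d : PySem.Dict Int Int) x => d.insert x (d.getD x 0 + 1)) PySem.Dict.empty
  let ranked := PySem.List.sorted counts.items (fun kv => -kv.2) false
  match ranked with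
  | [] => none
  | kv :: _ => some kv.1

-- ===== PRECONDITION & SPEC =====
def Spec_MostOccur (group : List Int) (out : Option Int) : Prop := out = MostOccur_alt group
instance (group : List Int) (out : Option Int) : Decidable (Spec_MostOccur group out) := by unfold Spec_MostOccur; infer_instance

-- ===== CLAIM (what is proved, stated in full; the proofs are below) =====
def Claim_equal_MostOccur : Prop := ∀ (group : List Int), Dom_MostOccur group → Spec_MostOccur group (MostOccur group)

-- ===== LEMMAS AND PROOFS =====

-- A's first loop keeps the dict exactly as B's counting loop does (the set s only
-- mirrors the dict's key set, so both branches perform the same dict update).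
lemma foldA_fst (l : List Int) (d : PySem.Dict Int Int) (s : PySem.Set Int)
    (h : ∀ x, x ∈ s ↔ d.contains x = true) :
    (l.foldl
      (fun (p : PySem.Dict Int Int × PySem.Set Int) x =>
        if PySem.Set.contains p.2 x then (p.1.insert x (p.1.getD x 0 + 1), p.2)
        else (p.1.insert x 1, PySem.Set.add p.2 x)) (d, s)).1
    = l.foldl (fun d x => d.insert x (d.getD x 0 + 1)) d := by
  induction l generalizing d s with
  | nil => rfl
  | cons x l ih =>
    simp only [List.foldl]
    by_cases hc : PySem.Set.contains s x = true
    · rw [if_pos hc]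
      apply ih
      intro y
      rw [PySem.Dict.contains_insert]
      constructor
      · intro hy
        by_cases hyx : y = x
        · simp [hyx]
        · simp [(h y).1 hy]
      · intro hy
        rcases Bool.or_eq_true_iff.1 hy with h1 | h1
        · have : y = x := by simpa using h1
          exact this ▸ (PySem.Set.contains_iff s x).1 hc
        · exact (h y).2 h1
    · rw [if_neg hc]
      have hx : x ∉ s := fun hm => hc ((PySem.Set.contains_iff s x).2 hm)
      have hdx : d.contains x = false := by
        cases hdc : d.contains x
        · rfl
        · exact absurd ((h x).2 hdc) hx
      have hg : d.getD x 0 = 0 := PySem.Dict.getD_of_not_contains d 0 hdx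
      have : d.insert x 1 = d.insert x (d.getD x 0 + 1) := by rw [hg]; norm_num
      rw [this]
      apply ih
      intro y
      rw [PySem.Set.mem_add, PySem.Dict.contains_insert]
      constructor
      · rintro (hy | rfl)
        · simp [(h y).1 hy]
        · simp
      · intro hy
        rcases Bool.or_eq_true_iff.1 hy with h1 | h1
        · right; simpa using h1
        · left; exact (h y).2 h1

-- the min?-fold keeps its accumulator when nothing beats it
lemma foldl_minstep_const {α : Type} (key : α → Int) (a : α) (l : List α)
    (h : ∀ x ∈ l, ¬ key x < key a) :
    l.foldl
      (fun acc x => match acc with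
        | none => some x
        | some m => if key x < key m then some x else some m)
      (some a) = some a := by
  induction l with
  | nil => rfl
  | cons x l ih =>
    simp only [List.foldl]
    rw [if_neg (h x (List.mem_cons_self))]
    exact ih (fun y hy => h y (List.mem_cons_of_mem _ hy))

lemma min?_cons_of_forall {α : Type} (key : α → Int) (a : α) (l : List α)
    (h : ∀ x ∈ l, ¬ key x < key a) :
    PySem.List.min? (a :: l) key = some a := by
  simp only [PySem.List.min?, List.foldl]
  exact foldl_minstep_const key a l h

-- dropping the head does not change min? when something in the tail beats it
lemma min?_cons_of_exists {α : Type} (key : α → Int) (a : α) (l : List α)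
    (h : ∃ x ∈ l, key x < key a) :
    PySem.List.min? (a :: l) key = PySem.List.min? l key := by
  induction l generalizing a with
  | nil => rcases h with ⟨x, hx, _⟩; exact absurd hx (List.not_mem_nil)
  | cons b l ih =>
    by_cases hb : key b < key a
    · simp only [PySem.List.min?, List.foldl, if_pos hb]
    · rcases h with ⟨x, hx, hxa⟩
      have hxl : x ∈ l := by
        rcases List.mem_cons.1 hx with rfl | hxl
        · exact absurd hxa hb
        · exact hxl
      have h1 : PySem.List.min? (a :: l) key = PySem.List.min? l key :=
        ih a ⟨x, hxl, hxa⟩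
      have h2 : PySem.List.min? (b :: l) key = PySem.List.min? l key :=
        ih b ⟨x, hxl, lt_of_lt_of_le hxa (not_lt.1 hb)⟩
      have e1 : PySem.List.min? (a :: b :: l) key = PySem.List.min? (a :: l) key := by
        simp only [PySem.List.min?, List.foldl, if_neg hb]
      rw [e1, h1, h2]

-- A's selection (first key attaining the maximum count) equals the head of B's
-- stable descending-count ranking, phrased through min? over the negated counts.
lemma find_eq_min_fst (ks : List Int) (f : Int → Int) (M : Int)
    (hmax : ∀ k ∈ ks, f k ≤ M) (hmem : ∃ k ∈ ks, f k = M) :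
    ks.find? (fun k => decide (f k = M))
      = (PySem.List.min? (ks.map (fun k => (k, f k))) (fun kv => -kv.2)).map Prod.fst := by
  induction ks with
  | nil => rcases hmem with ⟨k, hk, _⟩; exact absurd hk (List.not_mem_nil)
  | cons k ks ih =>
    by_cases hk : f k = M
    · rw [List.find?_cons_of_pos (by simpa using hk), List.map_cons]
      rw [min?_cons_of_forall (fun kv => -kv.2) (k, f k) _ ?_]
      · rfl
      · intro kv hkv
        rcases List.mem_map.1 hkv with ⟨k2, hk2, rfl⟩
        simp only [not_lt, neg_le_neg_iff, hk]
        exact hmax k2 (List.mem_cons_of_mem _ hk2)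
    · rw [List.find?_cons_of_neg (by simpa using hk), List.map_cons]
      have hkM : f k < M := lt_of_le_of_ne (hmax k List.mem_cons_self) hk
      rcases hmem with ⟨k', hk', hfk'⟩
      have hk'ks : k' ∈ ks := by
        rcases List.mem_cons.1 hk' with rfl | h
        · exact absurd hfk' hk
        · exact h
      rw [show PySem.List.min? ((k, f k) :: List.map (fun k => (k, f k)) ks)
            (fun kv => -kv.2)
          = PySem.List.min? (List.map (fun k => (k, f k)) ks) (fun kv => -kv.2) from
        min?_cons_of_exists _ _ _
          ⟨(k', f k'), List.mem_map.2 ⟨k', hk'ks, rfl⟩, by simp [hfk']; omega⟩]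
      exact ih (fun j hj => hmax j (List.mem_cons_of_mem _ hj)) ⟨k', hk'ks, hfk'⟩

-- head of a stable sort is the first key-minimal element
lemma head?_sorted_min {α : Type} (l : List α) (key : α → Int) :
    (PySem.List.sorted l key false).head? = PySem.List.min? l key := by
  induction l using List.reverseRecOn with
  | nil => rfl
  | append_singleton l x ih =>
    have hs : PySem.List.sorted (l ++ [x]) key false
        = PySem.List.insertBy (fun a b => decide (key a < key b)) x
            (PySem.List.sorted l key false) := by
      rw [PySem.List.sorted_eq_foldl_insertBy, PySem.List.sorted_eq_foldl_insertBy,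
        List.foldl_append]
      rfl
    have hm : PySem.List.min? (l ++ [x]) key
        = (match PySem.List.min? l key with
            | none => some x
            | some m => if key x < key m then some x else some m) := by
      simp only [PySem.List.min?, List.foldl_append, List.foldl]
      rfl
    rw [hs, hm]
    clear hm
    cases hsl : PySem.List.sorted l key false with
    | nil =>
      rw [hsl] at ih
      rw [← ih]
      rfl
    | cons m t =>
      rw [hsl] at ih
      rw [← ih]
      simp only [List.head?]
      by_cases hlt : key x < key m
      · simp [PySem.List.insertBy, hlt]
      · simp [PySem.List.insertBy, hlt]

-- ===== VERDICT (by name: the statement is the Claim_ definition above) =====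
theorem MostOccur_spec : Claim_equal_MostOccur := by
  intro group _
  unfold Spec_MostOccur MostOccur MostOccur_alt
  simp only []
  rw [foldA_fst group PySem.Dict.empty PySem.Set.empty
      (by intro x; simp [PySem.Set.empty, PySem.Dict.contains_empty])]
  rw [PySem.Dict.foldl_insert_getD_add_one_eq_counter]
  cases hg : group with
  | nil => decide
  | cons x rest =>
    rw [← hg]
    have hS : (PySem.Dict.counter group).keys = PySem.Set.ofList group :=
      PySem.Dict.keys_counter group
    have hI : (PySem.Dict.counter group).items
        = (PySem.Set.ofList group).map (fun k => (k, (group.count k : Int))) :=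
      PySem.Dict.items_counter group
    have hV : (PySem.Dict.counter group).values
        = (PySem.Set.ofList group).map (fun k => (group.count k : Int)) := by
      show (PySem.Dict.counter group).items.map Prod.snd = _
      rw [hI, List.map_map]
      rfl
    have hSne : PySem.Set.ofList group ≠ [] := by
      rw [hg, PySem.Set.ofList_cons]
      exact List.cons_ne_nil _ _
    cases hM : PySem.List.max? ((PySem.Set.ofList group).map (fun k => (group.count k : Int)))
        (fun v => v) with
    | none =>
      exfalso
      have := (PySem.List.max?_eq_none_iff _ _).1 hM
      exact hSne (List.map_eq_nil_iff.1 this)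
    | some M =>
      have hmem0 : M ∈ (PySem.Set.ofList group).map (fun k => (group.count k : Int)) :=
        PySem.List.max?_mem hM
      rcases List.mem_map.1 hmem0 with ⟨k0, hk0, hfk0⟩
      have hmax0 : ∀ k ∈ PySem.Set.ofList group, (group.count k : Int) ≤ M := by
        intro k hk
        exact PySem.List.max?_isMax hM _ (List.mem_map_of_mem hk)
      rw [hS, hV, hM]
      have hcond : ∀ k : Int,
          (fun key => decide (some ((PySem.Dict.counter group).getD key 0) = some M)) k
          = (fun key => decide ((group.count key : Int) = M)) k := by
        intro k
        simp [PySem.Dict.getD_counter]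
      rw [funext hcond]
      rw [find_eq_min_fst (PySem.Set.ofList group) (fun k => (group.count k : Int)) M
        hmax0 ⟨k0, hk0, hfk0⟩]
      rw [hI, ← head?_sorted_min]
      cases PySem.List.sorted
          ((PySem.Set.ofList group).map (fun k => (k, (group.count k : Int))))
          (fun kv => -kv.2) false with
      | nil => rfl
      | cons kv t => rfl
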